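-- pv_equiv track=rewrite | github.com/Neumenon/glyph | py/glyph/patch.py | _split_next_value
-- ===== SOURCE A (Python) =====
-- def _split_next_value(s: str) -> tuple[str, str]:
--     """Split out the next value token from a space-separated string."""
--     s = s.strip()
--     if not s:
--         return "", ""
--
--     if s[0] == '"':
--         # Quoted string — find matching close quote
--         i = 1
--         while i < len(s):
--             if s[i] == "\\" and i + 1 < len(s):
--                 i += 2
--                 continue
--             if s[i] == '"':
--                 return s[: i + 1], s[i + 1 :]
--             i += 1
--         return s, ""
--
--     if s[0] in ("{", "["):
--         # Find matching brace
--         open_char, close_char = s[0], "}" if s[0] == "{" else "]"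
--         depth = 0
--         for i, c in enumerate(s):
--             if c == open_char:
--                 depth += 1
--             elif c == close_char:
--                 depth -= 1
--                 if depth == 0:
--                     return s[: i + 1], s[i + 1 :]
--         return s, ""
--
--     # Bare token — split on space
--     idx = s.find(" ")
--     if idx < 0:
--         return s, ""
--     return s[:idx], s[idx:]
-- ===== SOURCE B (Python) =====
-- def _split_next_value(s: str) -> tuple[str, str]:
--     """Split out the next value token from a space-separated string."""
--     s = s.strip()
--     if not s:
--         return "", ""
--
--     if s[0] == '"':
--         # Jump between quote occurrences with str.find; a quote at j closes the
--         # string iff the run of backslashes immediately before it (not reaching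
--         # the opening quote) has even length — a parity test instead of a
--         # character-by-character escape scan.
--         j = s.find('"', 1)
--         while j != -1:
--             k = j
--             while k > 1 and s[k - 1] == "\\":
--                 k -= 1
--             if (j - k) % 2 == 0:
--                 return s[: j + 1], s[j + 1 :]
--             j = s.find('"', j + 1)
--         return s, ""
--
--     if s[0] in ("{", "["):
--         # Jump between closing-bracket occurrences with str.find; the matching
--         # one is the first whose prefix holds equally many openers and closers
--         # (count-balance test instead of a running depth counter).
--         close = "}" if s[0] == "{" else "]"
--         j = s.find(close)
--         while j != -1:
--             if s.count(s[0], 0, j + 1) == s.count(close, 0, j + 1):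
--                 return s[: j + 1], s[j + 1 :]
--             j = s.find(close, j + 1)
--         return s, ""
--
--     head, sep, tail = s.partition(" ")
--     return (head, sep + tail) if sep else (s, "")
-- ===== Notes on version B (the rewrite author's own statement) =====
-- stated objective: alternative
-- what changed: The quoted branch replaces the escape-aware character scan by jumping between quote occurrences with str.find and deciding each by the parity of its preceding backslash run; the brace branch replaces the running depth counter by jumping between closing-bracket occurrences and testing opener/closer count balance of the prefix; the bare branch uses str.partition.
import Mathlib
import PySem

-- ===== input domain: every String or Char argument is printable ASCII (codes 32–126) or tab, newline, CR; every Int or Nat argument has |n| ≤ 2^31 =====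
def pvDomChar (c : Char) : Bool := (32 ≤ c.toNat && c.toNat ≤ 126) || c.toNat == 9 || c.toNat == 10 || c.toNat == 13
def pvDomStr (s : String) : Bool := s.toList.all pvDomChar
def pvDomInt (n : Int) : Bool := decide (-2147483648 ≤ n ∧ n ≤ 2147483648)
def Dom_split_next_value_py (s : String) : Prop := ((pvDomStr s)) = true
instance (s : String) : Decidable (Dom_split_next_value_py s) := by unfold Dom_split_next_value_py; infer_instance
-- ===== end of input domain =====

-- B decides quotes by backslash-run parity at each find-located quote and the matching
-- bracket by prefix count balance at each find-located closer, instead of A's scans;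
-- an alternative mechanism of similar cost, not claimed faster.

-- ===== PORT A =====

-- while loop of the quoted branch: index i into cs, i += 2 on escape pairs
def aQuotedLoop (cs : List Char) (i : Nat) : String × String :=
  if h : i < cs.length then
    if cs[i] = '\\' ∧ i + 1 < cs.length then
      aQuotedLoop cs (i + 2)
    else if cs[i] = '"' then
      (String.ofList (cs.take (i + 1)), String.ofList (cs.drop (i + 1)))
    else
      aQuotedLoop cs (i + 1)
  else (String.ofList cs, "")
  termination_by cs.length - i

-- 'for i, c in enumerate(s)' of the brace branch: rest = cs.drop i
def aBraceLoop (cs : List Char) (openC closeC : Char) (depth : Int) (i : Nat) :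
    List Char → String × String
  | [] => (String.ofList cs, "")
  | c :: rest =>
    if c = openC then aBraceLoop cs openC closeC (depth + 1) (i + 1) rest
    else if c = closeC then
      if depth - 1 = 0 then (String.ofList (cs.take (i + 1)), String.ofList (cs.drop (i + 1)))
      else aBraceLoop cs openC closeC (depth - 1) (i + 1) rest
    else aBraceLoop cs openC closeC depth (i + 1) rest

-- hand port of s.find(" ") (single-char needle): first index of ' ', else -1; exact
def aFindSp : List Char → Int
  | [] => -1
  | c :: cs =>
    if c = ' ' then 0
    else
      let r := aFindSp cs
      if r < 0 then -1 else r + 1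

def split_next_value_py (s : String) : String × String :=
  let t := PySem.Str.strip s
  let cs := t.toList
  match cs with
  | [] => ("", "")
  | c :: _ =>
    if c = '"' then aQuotedLoop cs 1
    else if c = '{' ∨ c = '[' then
      aBraceLoop cs c (if c = '{' then '}' else ']') 0 0 cs
    else
      let idx := aFindSp cs
      if idx < 0 then (String.ofList cs, "")
      -- idx ≥ 0 in this branch, so toNat is the exact Python index
      else (String.ofList (cs.take idx.toNat), String.ofList (cs.drop idx.toNat))

-- ===== PORT B =====

-- hand port of s.find(t, j) for a single-char needle: first index p ≥ j with s[p] = t,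
-- rendered as Option Nat (none = Python's -1); exact
def bFindCh (cs : List Char) (t : Char) (j : Nat) : Option Nat :=
  if h : j < cs.length then
    if cs[j] = t then some j else bFindCh cs t (j + 1)
  else none
  termination_by cs.length - j

theorem bFindCh_some_bounds (cs : List Char) (t : Char) (j p : Nat)
    (h : bFindCh cs t j = some p) : j ≤ p ∧ p < cs.length := by
  suffices H : ∀ n j, cs.length - j ≤ n → bFindCh cs t j = some p → j ≤ p ∧ p < cs.length by
    exact H (cs.length - j) j le_rfl h
  intro n
  induction n with
  | zero =>
    intro j hn hj
    rw [bFindCh, dif_neg (by omega : ¬ j < cs.length)] at hj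
    cases hj
  | succ n ih =>
    intro j hn hj
    rw [bFindCh] at hj
    by_cases hlt : j < cs.length
    · rw [dif_pos hlt] at hj
      by_cases he : cs[j] = t
      · rw [if_pos he] at hj
        cases hj
        exact ⟨le_rfl, hlt⟩
      · rw [if_neg he] at hj
        have := ih (j + 1) (by omega) hj
        omega
    · rw [dif_neg hlt] at hj
      cases hj

-- inner 'while k > 1 and s[k-1] == "\\"' of the quoted branch; k ≤ j < len(s) always
-- holds in B, so getD is the exact s[k-1]
def bBackRun (cs : List Char) (k : Nat) : Nat :=
  if h : 1 < k ∧ cs.getD (k - 1) ' ' = '\\' then bBackRun cs (k - 1) else k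
  termination_by k
  decreasing_by omega

-- outer 'while j != -1' of the quoted branch, recursing on the next search start
def bQuoteFrom (cs : List Char) (j : Nat) : String × String :=
  match hp : bFindCh cs '"' j with
  | none => (String.ofList cs, "")
  | some p =>
    let k := bBackRun cs p
    if (p - k) % 2 = 0 then
      (String.ofList (cs.take (p + 1)), String.ofList (cs.drop (p + 1)))
    else bQuoteFrom cs (p + 1)
  termination_by cs.length - j
  decreasing_by
    have := bFindCh_some_bounds cs '"' j p hp
    omega

-- 'while j != -1' of the brace branch; s.count(c, 0, j+1) = occurrences of c in s[0:j+1]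
def bBraceFrom (cs : List Char) (openC closeC : Char) (j : Nat) : String × String :=
  match hp : bFindCh cs closeC j with
  | none => (String.ofList cs, "")
  | some p =>
    if (cs.take (p + 1)).count openC = (cs.take (p + 1)).count closeC then
      (String.ofList (cs.take (p + 1)), String.ofList (cs.drop (p + 1)))
    else bBraceFrom cs openC closeC (p + 1)
  termination_by cs.length - j
  decreasing_by
    have := bFindCh_some_bounds cs closeC j p hp
    omega

-- s.partition(" "): (head, sep, tail) with sep = [' '] iff a space occurs
def bPartition : List Char → List Char × List Char × List Char
  | [] => ([], [], [])
  | c :: rest =>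
    if c = ' ' then ([], [' '], rest)
    else
      let (h, sep, t) := bPartition rest
      (c :: h, sep, t)

def split_next_value_py_alt (s : String) : String × String :=
  let t := PySem.Str.strip s
  let cs := t.toList
  match cs with
  | [] => ("", "")
  | c :: _ =>
    if c = '"' then bQuoteFrom cs 1
    else if c = '{' ∨ c = '[' then
      bBraceFrom cs c (if c = '{' then '}' else ']') 0
    else
      let (h, sep, tl) := bPartition cs
      if sep ≠ [] then (String.ofList h, String.ofList (sep ++ tl))
      else (String.ofList cs, "")

-- ===== PRECONDITION & SPEC =====
def Spec_split_next_value_py (s : String) (out : String × String) : Prop := out = split_next_value_py_alt s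
instance (s : String) (out : String × String) : Decidable (Spec_split_next_value_py s out) := by unfold Spec_split_next_value_py; infer_instance

-- ===== CLAIM (what is proved, stated in full; the proofs are below) =====
def Claim_equal_split_next_value_py : Prop := ∀ (s : String), Dom_split_next_value_py s → Spec_split_next_value_py s (split_next_value_py s)

-- ===== LEMMAS AND PROOFS =====
theorem bFindCh_none_of_ge (cs : List Char) (t : Char) (j : Nat) (h : cs.length ≤ j) :
    bFindCh cs t j = none := by
  rw [bFindCh, dif_neg (by omega : ¬ j < cs.length)]

theorem bFindCh_skip (cs : List Char) (t : Char) (j : Nat) (h : j < cs.length)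
    (hne : cs[j] ≠ t) : bFindCh cs t j = bFindCh cs t (j + 1) := by
  rw [bFindCh, dif_pos h, if_neg hne]

theorem bFindCh_hit (cs : List Char) (t : Char) (j : Nat) (h : j < cs.length)
    (he : cs[j] = t) : bFindCh cs t j = some j := by
  rw [bFindCh, dif_pos h, if_pos he]

theorem bBackRun_stop (cs : List Char) (k : Nat)
    (h : ¬ (1 < k ∧ cs.getD (k - 1) ' ' = '\\')) : bBackRun cs k = k := by
  rw [bBackRun, dif_neg h]

theorem bBackRun_step (cs : List Char) (k : Nat)
    (h : 1 < k ∧ cs.getD (k - 1) ' ' = '\\') : bBackRun cs k = bBackRun cs (k - 1) := by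
  rw [bBackRun, dif_pos h]

theorem bBackRun_le (cs : List Char) (k : Nat) : bBackRun cs k ≤ k := by
  induction k using Nat.strong_induction_on with
  | _ k ih =>
    by_cases h : 1 < k ∧ cs.getD (k - 1) ' ' = '\\'
    · rw [bBackRun_step cs k h]
      have := ih (k - 1) (by omega)
      omega
    · rw [bBackRun_stop cs k h]

theorem bQuoteFrom_of_find_none (cs : List Char) (j : Nat)
    (h : bFindCh cs '"' j = none) : bQuoteFrom cs j = (String.ofList cs, "") := by
  rw [bQuoteFrom.eq_def]
  split
  · rfl
  · rename_i p hp; rw [h] at hp; cases hp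

theorem bQuoteFrom_of_find_some (cs : List Char) (j p : Nat)
    (h : bFindCh cs '"' j = some p) :
    bQuoteFrom cs j =
      if (p - bBackRun cs p) % 2 = 0 then
        (String.ofList (cs.take (p + 1)), String.ofList (cs.drop (p + 1)))
      else bQuoteFrom cs (p + 1) := by
  rw [bQuoteFrom.eq_def]
  split
  · rename_i hp; rw [h] at hp; cases hp
  · rename_i q hq
    rw [h] at hq
    cases hq
    rfl

theorem bQuoteFrom_congr (cs : List Char) (j1 j2 : Nat)
    (h : bFindCh cs '"' j1 = bFindCh cs '"' j2) :
    bQuoteFrom cs j1 = bQuoteFrom cs j2 := by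
  cases hv : bFindCh cs '"' j2 with
  | none => rw [bQuoteFrom_of_find_none cs j1 (by rw [h, hv]),
      bQuoteFrom_of_find_none cs j2 hv]
  | some p => rw [bQuoteFrom_of_find_some cs j1 p (by rw [h, hv]),
      bQuoteFrom_of_find_some cs j2 p hv]

theorem quoteAux (cs : List Char) :
    ∀ n i, cs.length - i ≤ n → 1 ≤ i → (i - bBackRun cs i) % 2 = 0 →
      aQuotedLoop cs i = bQuoteFrom cs i := by
  intro n
  induction n with
  | zero =>
    intro i hn h1 _
    have hge : cs.length ≤ i := by omega
    rw [aQuotedLoop, dif_neg (by omega : ¬ i < cs.length),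
      bQuoteFrom_of_find_none cs i (bFindCh_none_of_ge cs '"' i hge)]
  | succ n ih =>
    intro i hn h1 halign
    by_cases hi : i < cs.length
    · have hble := bBackRun_le cs i
      by_cases hbs : cs[i] = '\\'
      · by_cases h2 : i + 1 < cs.length
        · -- escape pair: A jumps i+2; B skips (and rejects an odd-parity quote at i+1)
          rw [aQuotedLoop, dif_pos hi, if_pos ⟨hbs, h2⟩]
          have hgd : cs.getD i ' ' = '\\' := by
            rw [List.getD_eq_getElem cs ' ' hi]
            exact hbs
          have hrun1 : bBackRun cs (i + 1) = bBackRun cs i := by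
            rw [bBackRun_step cs (i + 1) ⟨by omega, by
              rw [show i + 1 - 1 = i by omega]
              exact hgd⟩]
            rw [show i + 1 - 1 = i by omega]
          have halign2 : ((i + 2) - bBackRun cs (i + 2)) % 2 = 0 := by
            by_cases hb2 : cs.getD (i + 1) ' ' = '\\'
            · rw [bBackRun_step cs (i + 2) ⟨by omega, by
                rw [show i + 2 - 1 = i + 1 by omega]
                exact hb2⟩]
              rw [show i + 2 - 1 = i + 1 by omega, hrun1]
              omega
            · rw [bBackRun_stop cs (i + 2) (by
                intro hcontra
                apply hb2
                have := hcontra.2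
                rwa [show i + 2 - 1 = i + 1 by omega] at this)]
              omega
          have hB : bQuoteFrom cs i = bQuoteFrom cs (i + 2) := by
            by_cases hq1 : cs[i + 1] = '"'
            · have hfind : bFindCh cs '"' i = some (i + 1) := by
                rw [bFindCh_skip cs '"' i hi (by rw [hbs]; decide),
                  bFindCh_hit cs '"' (i + 1) h2 hq1]
              rw [bQuoteFrom_of_find_some cs i (i + 1) hfind, hrun1,
                if_neg (by omega : ¬ (i + 1 - bBackRun cs i) % 2 = 0)]
            · exact bQuoteFrom_congr cs i (i + 2) (by
                rw [bFindCh_skip cs '"' i hi (by rw [hbs]; decide),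
                  bFindCh_skip cs '"' (i + 1) h2 hq1])
          rw [hB]
          exact ih (i + 2) (by omega) (by omega) halign2
        · -- lone trailing backslash: both fall off the end
          rw [aQuotedLoop, dif_pos hi, if_neg (by tauto),
            if_neg (by rw [hbs]; decide), aQuotedLoop,
            dif_neg (by omega : ¬ i + 1 < cs.length),
            bQuoteFrom_of_find_none cs i ?hnone]
          case hnone =>
            rw [bFindCh_skip cs '"' i hi (by rw [hbs]; decide)]
            exact bFindCh_none_of_ge cs '"' (i + 1) (by omega)
      · by_cases hq : cs[i] = '"'
        · -- aligned quote: both split here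
          rw [aQuotedLoop, dif_pos hi, if_neg (by tauto), if_pos hq,
            bQuoteFrom_of_find_some cs i i (bFindCh_hit cs '"' i hi hq),
            if_pos halign]
        · -- ordinary character: both advance
          rw [aQuotedLoop, dif_pos hi, if_neg (by tauto), if_neg hq]
          have halign1 : ((i + 1) - bBackRun cs (i + 1)) % 2 = 0 := by
            rw [bBackRun_stop cs (i + 1) (by
              intro hcontra
              apply hbs
              have := hcontra.2
              rw [show i + 1 - 1 = i by omega, List.getD_eq_getElem cs ' ' hi] at this
              exact this)]
            omega
          rw [ih (i + 1) (by omega) (by omega) halign1]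
          exact bQuoteFrom_congr cs (i + 1) i
            (bFindCh_skip cs '"' i hi hq).symm
    · rw [aQuotedLoop, dif_neg hi,
        bQuoteFrom_of_find_none cs i (bFindCh_none_of_ge cs '"' i (by omega))]

theorem todo_quote (cs : List Char) : aQuotedLoop cs 1 = bQuoteFrom cs 1 := by
  refine quoteAux cs (cs.length - 1) 1 le_rfl le_rfl ?_
  rw [bBackRun_stop cs 1 (by intro h; omega)]
theorem bBraceFrom_of_find_none (cs : List Char) (o c : Char) (j : Nat)
    (h : bFindCh cs c j = none) : bBraceFrom cs o c j = (String.ofList cs, "") := by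
  rw [bBraceFrom.eq_def]
  split
  · rfl
  · rename_i p hp; rw [h] at hp; cases hp

theorem bBraceFrom_of_find_some (cs : List Char) (o c : Char) (j p : Nat)
    (h : bFindCh cs c j = some p) :
    bBraceFrom cs o c j =
      if (cs.take (p + 1)).count o = (cs.take (p + 1)).count c then
        (String.ofList (cs.take (p + 1)), String.ofList (cs.drop (p + 1)))
      else bBraceFrom cs o c (p + 1) := by
  rw [bBraceFrom.eq_def]
  split
  · rename_i hp; rw [h] at hp; cases hp
  · rename_i q hq
    rw [h] at hq
    cases hq
    rfl

theorem bBraceFrom_congr (cs : List Char) (o c : Char) (j1 j2 : Nat)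
    (h : bFindCh cs c j1 = bFindCh cs c j2) :
    bBraceFrom cs o c j1 = bBraceFrom cs o c j2 := by
  cases hv : bFindCh cs c j2 with
  | none => rw [bBraceFrom_of_find_none cs o c j1 (by rw [h, hv]),
      bBraceFrom_of_find_none cs o c j2 hv]
  | some p => rw [bBraceFrom_of_find_some cs o c j1 p (by rw [h, hv]),
      bBraceFrom_of_find_some cs o c j2 p hv]

theorem take_succ_concat (cs : List Char) (i : Nat) (h : i < cs.length) :
    cs.take (i + 1) = cs.take i ++ [cs[i]] := by
  rw [← List.take_concat_get' cs i h]

theorem braceAux (cs : List Char) (o c : Char) (hne : o ≠ c) :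
    ∀ rest i, rest = cs.drop i →
      aBraceLoop cs o c (((cs.take i).count o : Int) - ((cs.take i).count c : Int)) i rest
        = bBraceFrom cs o c i := by
  intro rest
  induction rest with
  | nil =>
    intro i hrest
    have hlen : cs.length ≤ i := by
      by_contra hlt
      have := List.getElem_cons_drop (show i < cs.length by omega)
      rw [← hrest] at this
      cases this
    rw [bBraceFrom_of_find_none cs o c i (bFindCh_none_of_ge cs c i hlen)]
    rfl
  | cons ch rest' ih =>
    intro i hrest
    have hi : i < cs.length := by
      by_contra hge
      rw [List.drop_eq_nil_of_le (by omega)] at hrest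
      cases hrest
    have hdrop : cs.drop i = cs[i] :: cs.drop (i + 1) := (List.getElem_cons_drop hi).symm
    rw [hdrop] at hrest
    obtain ⟨hch, hrest'⟩ : ch = cs[i] ∧ rest' = cs.drop (i + 1) := by
      cases hrest; exact ⟨rfl, rfl⟩
    subst hch hrest'
    have htake := take_succ_concat cs i hi
    by_cases ho : cs[i] = o
    · -- opener: depth + 1, find skips
      have hcnto : (cs.take (i + 1)).count o = (cs.take i).count o + 1 := by
        rw [htake, List.count_append, ho]; simp
      have hcntc : (cs.take (i + 1)).count c = (cs.take i).count c := by
        rw [htake, List.count_append, ho]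
        simp [hne]
      simp only [aBraceLoop, if_pos ho]
      have harith : ((cs.take i).count o : Int) - ((cs.take i).count c : Int) + 1
          = ((cs.take (i + 1)).count o : Int) - ((cs.take (i + 1)).count c : Int) := by
        rw [hcnto, hcntc]; push_cast; ring
      rw [harith, ih (i + 1) rfl]
      exact (bBraceFrom_congr cs o c i (i + 1)
        (bFindCh_skip cs c i hi (by rw [ho]; exact hne))).symm
    · by_cases hc : cs[i] = c
      · -- closer: test balance
        have hcnto : (cs.take (i + 1)).count o = (cs.take i).count o := by
          rw [htake, List.count_append, hc]
          simp [Ne.symm hne]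
        have hcntc : (cs.take (i + 1)).count c = (cs.take i).count c + 1 := by
          rw [htake, List.count_append, hc]; simp
        simp only [aBraceLoop, if_neg ho, if_pos hc]
        have hfind := bFindCh_hit cs c i hi hc
        rw [bBraceFrom_of_find_some cs o c i i hfind]
        by_cases hbal : (cs.take (i + 1)).count o = (cs.take (i + 1)).count c
        · have hd : ((cs.take i).count o : Int) - ((cs.take i).count c : Int) - 1 = 0 := by
            rw [hcnto, hcntc] at hbal
            omega
          rw [if_pos hbal, if_pos hd]
        · have hd : ¬ (((cs.take i).count o : Int) - ((cs.take i).count c : Int) - 1 = 0) := by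
            intro h0
            apply hbal
            rw [hcnto, hcntc]
            omega
          rw [if_neg hbal, if_neg hd]
          have harith : ((cs.take i).count o : Int) - ((cs.take i).count c : Int) - 1
              = ((cs.take (i + 1)).count o : Int) - ((cs.take (i + 1)).count c : Int) := by
            rw [hcnto, hcntc]
            push_cast
            ring
          rw [harith]
          exact ih (i + 1) rfl
      · -- other char: depth unchanged, find skips
        have hcnto : (cs.take (i + 1)).count o = (cs.take i).count o := by
          rw [htake, List.count_append]
          simp [ho]
        have hcntc : (cs.take (i + 1)).count c = (cs.take i).count c := by
          rw [htake, List.count_append]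
          simp [hc]
        simp only [aBraceLoop, if_neg ho, if_neg hc]
        rw [show ((cs.take i).count o : Int) - ((cs.take i).count c : Int)
            = ((cs.take (i + 1)).count o : Int) - ((cs.take (i + 1)).count c : Int) by
          rw [hcnto, hcntc]]
        rw [ih (i + 1) rfl]
        exact (bBraceFrom_congr cs o c i (i + 1) (bFindCh_skip cs c i hi hc)).symm

theorem todo_brace (cs : List Char) (o c : Char) (hne : o ≠ c) :
    aBraceLoop cs o c 0 0 cs = bBraceFrom cs o c 0 := by
  have := braceAux cs o c hne cs 0 rfl
  simpa using this
theorem bPartition_cons (c : Char) (cs : List Char) :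
    bPartition (c :: cs) =
      if c = ' ' then ([], [' '], cs)
      else (c :: (bPartition cs).1, (bPartition cs).2.1, (bPartition cs).2.2) := by
  by_cases h : c = ' ' <;> simp [bPartition, h]

theorem part_spec (cs : List Char) :
    ((bPartition cs).2.1 = [] ∧ (bPartition cs).1 = cs ∧ aFindSp cs = -1) ∨
    ((bPartition cs).2.1 = [' '] ∧ cs = (bPartition cs).1 ++ ' ' :: (bPartition cs).2.2 ∧
      aFindSp cs = ((bPartition cs).1.length : Int)) := by
  induction cs with
  | nil => left; exact ⟨rfl, rfl, rfl⟩
  | cons c cs ih =>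
    by_cases hsp : c = ' '
    · right
      simp [bPartition_cons, hsp, aFindSp]
    · set p := bPartition cs with hp
      rcases ih with ⟨h1, h2, h3⟩ | ⟨h1, h2, h3⟩
      · left
        simp only [bPartition_cons, hsp, if_false, aFindSp, h3, ← hp]
        refine ⟨h1, by rw [h2], by norm_num⟩
      · right
        simp only [bPartition_cons, hsp, if_false, aFindSp, h3, ← hp]
        refine ⟨h1, by rw [h2]; simp, ?_⟩
        have hnn : ¬ ((p.1.length : Int)) < 0 := not_lt.mpr (Int.natCast_nonneg _)
        rw [if_neg hnn]
        simp only [List.length_cons]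
        push_cast
        ring

theorem todo_bare (cs : List Char) :
    (let idx := aFindSp cs
     if idx < 0 then (String.ofList cs, "")
     else (String.ofList (cs.take idx.toNat), String.ofList (cs.drop idx.toNat)))
    = (let (h, sep, tl) := bPartition cs
       if sep ≠ [] then (String.ofList h, String.ofList (sep ++ tl))
       else (String.ofList cs, "")) := by
  have hb : bPartition cs = ((bPartition cs).1, (bPartition cs).2.1, (bPartition cs).2.2) := rfl
  rcases part_spec cs with ⟨h1, h2, h3⟩ | ⟨h1, h2, h3⟩
  · rw [hb, h1]
    simp [h3]
  · rw [hb, h1]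
    set p := bPartition cs with hp
    have hnn : ¬ aFindSp cs < 0 := by
      rw [h3]; exact not_lt.mpr (Int.natCast_nonneg _)
    simp only [hnn, if_false, ne_eq, List.cons_ne_nil, not_false_iff, if_true]
    have htn : (aFindSp cs).toNat = p.1.length := by rw [h3]; simp
    rw [htn]
    conv_lhs => rw [h2]
    rw [List.take_left, List.drop_left]
    simp

theorem split_core (cs : List Char) :
    (match cs with
     | [] => (("" : String), ("" : String))
     | c :: _ =>
       if c = '"' then aQuotedLoop cs 1
       else if c = '{' ∨ c = '[' then aBraceLoop cs c (if c = '{' then '}' else ']') 0 0 cs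
       else
         let idx := aFindSp cs
         if idx < 0 then (String.ofList cs, "")
         else (String.ofList (cs.take idx.toNat), String.ofList (cs.drop idx.toNat)))
    = (match cs with
       | [] => (("" : String), ("" : String))
       | c :: _ =>
         if c = '"' then bQuoteFrom cs 1
         else if c = '{' ∨ c = '[' then bBraceFrom cs c (if c = '{' then '}' else ']') 0
         else
           let (h, sep, tl) := bPartition cs
           if sep ≠ [] then (String.ofList h, String.ofList (sep ++ tl))
           else (String.ofList cs, "")) := by
  cases cs with
  | nil => rfl
  | cons c rest =>
    simp only
    by_cases hq : c = '"'
    · rw [if_pos hq, if_pos hq, todo_quote]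
    · rw [if_neg hq, if_neg hq]
      by_cases hbr : c = '{' ∨ c = '['
      · rw [if_pos hbr, if_pos hbr]
        rcases hbr with h | h <;> subst h <;> exact todo_brace _ _ _ (by decide)
      · rw [if_neg hbr, if_neg hbr]
        exact todo_bare (c :: rest)

-- ===== VERDICT (by name: the statement is the Claim_ definition above) =====
theorem split_next_value_py_spec : Claim_equal_split_next_value_py := by
  intro s _
  exact split_core ((PySem.Str.strip s).toList)
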